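-- pv_equiv track=rewrite | github.com/gareth618/mspbkt | utils.py | set_strings_from_minimal_sets
-- ===== SOURCE A (Python) =====
-- def includes(set_string1, set_string2):
--     return not any(bit2 == '1' and bit1 == '0' for bit1, bit2 in zip(set_string1, set_string2))
--
-- def minterms_first(set_strings):
--     minterms = []
--     non_minterms = []
--     for set_string in set_strings:
--         if any(includes(set_string, set_string_small) for set_string_small in minterms):
--             non_minterms += [set_string]
--         else:
--             minterms += [set_string]
--     return minterms, non_minterms
--
-- def set_strings_from_minimal_sets(minimal_set_strings):
--     label_count = len(minimal_set_strings[0])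
--     set_strings = []
--     for set_mask in range(1 << label_count):
--         set_string = ''.join('1' if set_mask & (1 << label) else '0' for label in range(label_count))
--         for minimal_set_string in minimal_set_strings:
--             if all(minimal_set_string[label] <= set_string[label] for label in range(label_count)):
--                 set_strings += [set_string]
--                 break
--     return minterms_first(set_strings)
-- ===== SOURCE B (Python) =====
-- def required_labels(set_string, label_count):
--     """Bitmask of labels a set must contain so that it includes the set described
--     by set_string (a position's character demands at least itself), or None if no
--     set over these labels can include it."""
--     labels = 0
--     for label in range(label_count):
--         char = set_string[label]
--         if char > '1':      # demands more than '1': no set string satisfies it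
--             return None
--         if char > '0':      # demands at least '1': the label is required
--             labels |= 1 << label
--     return labels
--
-- def set_strings_from_minimal_sets(minimal_set_strings):
--     label_count = len(minimal_set_strings[0])
--     reqs = [r for r in (required_labels(s, label_count) for s in minimal_set_strings)
--             if r is not None]
--     minterms = []
--     non_minterms = []
--     for mask in range(1 << label_count):
--         if any(r & mask == r for r in reqs):
--             set_string = ''.join('1' if mask & (1 << label) else '0' for label in range(label_count))
--             if any(r & mask == r and r != mask for r in reqs):
--                 non_minterms.append(set_string)
--             else:
--                 minterms.append(set_string)
--     return minterms, non_minterms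
-- ===== Notes on version B (the rewrite author's own statement) =====
-- stated objective: faster
-- what changed: B parses each minimal set string once into an optional integer bitmask of required labels (None when a position demands more than '1', so nothing can include it), decides coverage of each of the 2^n candidate masks by a bitwise subset test, and classifies minterm/non-minterm directly by 'some required mask is a strict submask' instead of A's per-character superset scans and quadratic minterms_first rescan of previously kept strings; …
-- outside the precondition, e.g. on set_strings_from_minimal_sets(['00', '1']): A returns (['00'], ['10', '01', '11']), B raises IndexError; on set_strings_from_minimal_sets(['10', '0']): A raises IndexError, B raises IndexError
import Mathlib
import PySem

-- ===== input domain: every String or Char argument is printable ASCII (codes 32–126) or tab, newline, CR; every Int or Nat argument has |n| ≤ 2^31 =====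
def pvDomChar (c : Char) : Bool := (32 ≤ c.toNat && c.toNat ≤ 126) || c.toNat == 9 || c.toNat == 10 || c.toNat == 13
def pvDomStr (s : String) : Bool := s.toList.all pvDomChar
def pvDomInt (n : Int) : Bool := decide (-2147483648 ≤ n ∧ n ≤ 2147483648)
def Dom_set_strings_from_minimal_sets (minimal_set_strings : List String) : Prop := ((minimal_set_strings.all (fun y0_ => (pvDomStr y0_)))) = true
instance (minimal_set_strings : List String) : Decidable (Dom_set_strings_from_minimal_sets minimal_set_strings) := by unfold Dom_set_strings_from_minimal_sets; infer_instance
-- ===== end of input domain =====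

-- B encodes each minimal set string once as an integer bitmask and classifies each of the 2^n
-- candidate masks by bitwise subset tests, instead of A's per-character superset scans and
-- quadratic minterms_first rescan of previously kept strings (faster, as measured by the
-- timing run on the generated inputs).

-- ===== PORT A =====
-- '1' if set_mask & (1 << label) else '0'  (label ≥ 0 always here, so shifting by label.toNat is exact)
def pvBitChar (set_mask : Int) (label : Int) : Char :=
  if PySem.Int.band set_mask (1 <<< label.toNat) ≠ 0 then '1' else '0'

-- includes(set_string1, set_string2)
def pvIncludes (set_string1 set_string2 : String) : Bool :=
  !((set_string1.toList.zip set_string2.toList).any (fun bits => bits.2 == '1' && bits.1 == '0'))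

-- minterms_first(set_strings)
def pvMintermsFirst (set_strings : List String) : List String × List String :=
  set_strings.foldl (fun acc set_string =>
    if acc.1.any (fun small => pvIncludes set_string small) then (acc.1, acc.2 ++ [set_string])
    else (acc.1 ++ [set_string], acc.2)) ([], [])

-- minimal_set_strings[0] via headD, s[label] via pyGetD: Pre_ admits only inputs where no indexing can raise.
-- The inner 'for m in …: if all(...): append; break' appends set_string iff some minimal string passes the all(...).
def set_strings_from_minimal_sets (minimal_set_strings : List String) : List String × List String :=
  let label_count : Int := PySem.Str.len (minimal_set_strings.headD "")
  let set_strings : List String :=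
    (PySem.List.pyRange 0 (1 <<< label_count.toNat) 1).foldl (fun acc set_mask =>
      let set_string : String := String.ofList ((PySem.List.pyRange 0 label_count 1).map (pvBitChar set_mask))
      if minimal_set_strings.any (fun minimal_set_string =>
            (PySem.List.pyRange 0 label_count 1).all (fun label =>
              PySem.List.pyGetD minimal_set_string.toList label ' ' ≤
                PySem.List.pyGetD set_string.toList label ' '))
      then acc ++ [set_string] else acc) []
  pvMintermsFirst set_strings

-- ===== PORT B =====
-- required_labels(set_string, label_count): the early 'return None' is ported as an
-- absorbing none state of the fold (once none, every later step keeps none, which is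
-- exactly the early return since the loop has no other effects).
def pvRequiredLabels (set_string : String) (label_count : Int) : Option Int :=
  (PySem.List.pyRange 0 label_count 1).foldl (fun st label =>
    match st with
    | none => none
    | some labels =>
      let char := PySem.List.pyGetD set_string.toList label ' '
      if '1' < char then none
      else if '0' < char then some (PySem.Int.bor labels (1 <<< label.toNat))
      else some labels) (some 0)

-- the comprehension '[r for r in (...) if r is not None]' is List.filterMap id of the map
def set_strings_from_minimal_sets_alt (minimal_set_strings : List String) : List String × List String :=
  let label_count : Int := PySem.Str.len (minimal_set_strings.headD "")
  let reqs : List Int :=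
    (minimal_set_strings.map (fun s => pvRequiredLabels s label_count)).filterMap id
  (PySem.List.pyRange 0 (1 <<< label_count.toNat) 1).foldl (fun acc mask =>
    if reqs.any (fun r => PySem.Int.band r mask == r) then
      let set_string : String := String.ofList ((PySem.List.pyRange 0 label_count 1).map (fun label =>
        if PySem.Int.band mask (1 <<< label.toNat) ≠ 0 then '1' else '0'))
      if reqs.any (fun r => PySem.Int.band r mask == r && r != mask) then (acc.1, acc.2 ++ [set_string])
      else (acc.1 ++ [set_string], acc.2)
    else acc) ([], [])

-- ===== PRECONDITION & SPEC =====
-- Pre_ excludes the empty list (A raises IndexError on minimal_set_strings[0]) and lists containing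
-- a string shorter than the first with no character above '1' (there A raises IndexError or returns
-- depending on the order in which its lazy all()/break reach the missing index, and B's parser
-- raises; a short string containing a character above '1' stops both programs before the missing
-- index, so such strings stay inside Pre_).
def Pre_set_strings_from_minimal_sets (minimal_set_strings : List String) : Prop :=
  minimal_set_strings ≠ [] ∧
  ∀ s ∈ minimal_set_strings,
    (minimal_set_strings.headD "").toList.length ≤ s.toList.length ∨
    (s.toList.any (fun c => decide ('1' < c))) = true
instance (minimal_set_strings : List String) : Decidable (Pre_set_strings_from_minimal_sets minimal_set_strings) := by
  unfold Pre_set_strings_from_minimal_sets; infer_instance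

def pvWitness_set_strings_from_minimal_sets : List String := ["01", "11"]

def Spec_set_strings_from_minimal_sets (minimal_set_strings : List String) (out : List String × List String) : Prop := out = set_strings_from_minimal_sets_alt minimal_set_strings
instance (minimal_set_strings : List String) (out : List String × List String) : Decidable (Spec_set_strings_from_minimal_sets minimal_set_strings out) := by unfold Spec_set_strings_from_minimal_sets; infer_instance

-- ===== CLAIM (what is proved, stated in full; the proofs are below) =====
def Claim_equal_set_strings_from_minimal_sets : Prop := ∀ (minimal_set_strings : List String), Dom_set_strings_from_minimal_sets minimal_set_strings → Pre_set_strings_from_minimal_sets minimal_set_strings → Spec_set_strings_from_minimal_sets minimal_set_strings (set_strings_from_minimal_sets minimal_set_strings)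

-- ===== LEMMAS AND PROOFS =====

-- Nat-level common shape of both programs
def pvOk (m : List Char) (n : Nat) : Bool :=
  !((List.range n).any (fun l => decide ('1' < m.getD l ' ')))

def pvReq (m : List Char) (n : Nat) : Nat :=
  (List.range n).foldl (fun r l =>
    if '1' < m.getD l ' ' then r
    else if '0' < m.getD l ' ' then r ||| 2 ^ l
    else r) 0

def pvRs (L : List String) (n : Nat) : List Nat :=
  (L.filter (fun m => pvOk m.toList n)).map (fun m => pvReq m.toList n)

def pvCov (rs : List Nat) (a : Nat) : Bool := rs.any (fun r => r &&& a == r)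
def pvStrict (rs : List Nat) (a : Nat) : Bool := rs.any (fun r => r &&& a == r && r != a)
def pvStr (n a : Nat) : List Char := (List.range n).map (fun l => if a.testBit l then '1' else '0')

def pvCanon (L : List String) : List String × List String :=
  let n := (L.headD "").toList.length
  let rs := pvRs L n
  ( ((List.range (2 ^ n)).filter (fun a => pvCov rs a && !pvStrict rs a)).map (fun a => String.ofList (pvStr n a)),
    ((List.range (2 ^ n)).filter (fun a => pvCov rs a && pvStrict rs a)).map (fun a => String.ofList (pvStr n a)) )

lemma pv_range_cast (n : Nat) :
    PySem.List.pyRange 0 (n : Int) 1 = (List.range n).map (fun (k : Nat) => (k : Int)) :=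
  PySem.List.pyRange_zero_natCast n

lemma pv_testBit_iff_and (a l : Nat) : a.testBit l = true ↔ a &&& (1 <<< l) ≠ 0 := by
  rw [Nat.shiftLeft_eq, Nat.one_mul, Nat.and_two_pow]
  cases h : a.testBit l <;> simp

lemma pv_sub_iff (r a : Nat) : r &&& a = r ↔ ∀ i, r.testBit i = true → a.testBit i = true := by
  constructor
  · intro h i hi
    have := congrArg (Nat.testBit · i) h
    simp only [Nat.testBit_and, hi, Bool.true_and] at this
    exact this
  · intro h
    apply Nat.eq_of_testBit_eq
    intro i
    cases hh : r.testBit i <;> simp [Nat.testBit_and, hh, h i]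

lemma pv_sub_le {r a : Nat} (h : r &&& a = r) : r ≤ a := by
  conv_lhs => rw [← h]
  exact Nat.and_le_right

lemma pv_sub_trans {r b a : Nat} (h1 : r &&& b = r) (h2 : b &&& a = b) : r &&& a = r := by
  calc r &&& a = (r &&& b) &&& a := by rw [h1]
    _ = r &&& (b &&& a) := Nat.and_assoc r b a
    _ = r &&& b := by rw [h2]
    _ = r := h1

lemma pv_foldl_req_testBit (f : Nat → Char) (n i : Nat) :
    ((List.range n).foldl (fun r l =>
        if '1' < f l then r else if '0' < f l then r ||| 2 ^ l else r) 0).testBit i =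
      (decide (i < n) && decide ('0' < f i) && !decide ('1' < f i)) := by
  induction n with
  | zero => simp
  | succ n ih =>
    rw [List.range_succ, List.foldl_append, List.foldl_cons, List.foldl_nil]
    by_cases hi : i = n
    · subst hi
      split_ifs with h1 h0
      · simp [ih, h1]
      · simp [Nat.testBit_or, ih, h0, h1]
      · simp [ih, h1, h0]
    · have hdec : decide (i < n + 1) = decide (i < n) := by
        apply decide_eq_decide.mpr; omega
      split_ifs with h1 h0
      · rw [ih, hdec]
      · rw [Nat.testBit_or, ih, Nat.testBit_two_pow, hdec]
        simp [Ne.symm hi]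
      · rw [ih, hdec]

lemma pv_testBit_pvReq (m : List Char) (n i : Nat) :
    (pvReq m n).testBit i =
      (decide (i < n) && decide ('0' < m.getD i ' ') && !decide ('1' < m.getD i ' ')) :=
  pv_foldl_req_testBit (fun l => m.getD l ' ') n i

lemma pv_strA_eq (n a : Nat) :
    (PySem.List.pyRange 0 (n : Int) 1).map (pvBitChar (a : Int)) = pvStr n a := by
  rw [pv_range_cast, List.map_map, pvStr]
  apply List.map_congr_left
  intro l _
  show pvBitChar (a : Int) (l : Int) = _
  rw [pvBitChar]
  simp only [Int.toNat_natCast, PySem.Int.band_natCast, ne_eq, Int.natCast_eq_zero]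
  have hiff := pv_testBit_iff_and a l
  cases hb : a.testBit l
  · rw [hb] at hiff
    rw [if_neg (by simpa using fun hc => Bool.false_ne_true (hiff.mpr hc)), if_neg (by simp)]
  · rw [if_pos (hiff.mp hb), if_pos rfl]

lemma pv_ite_eq_one (c : Bool) : ((if c = true then '1' else '0') == '1') = c := by
  cases c <;> decide

lemma pv_ite_eq_zero (c : Bool) : ((if c = true then '1' else '0') == '0') = !c := by
  cases c <;> decide

lemma pv_includes_eq (n a b : Nat) (hb : b < 2 ^ n) :
    pvIncludes (String.ofList (pvStr n a)) (String.ofList (pvStr n b)) = (b &&& a == b) := by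
  rw [pvIncludes, String.toList_ofList, String.toList_ofList, pvStr, pvStr, List.zip_map',
      List.any_map]
  have key : ((List.range n).any ((fun bits => bits.2 == '1' && bits.1 == '0') ∘
      fun l => ((if a.testBit l = true then '1' else '0'), (if b.testBit l = true then '1' else '0'))))
      = !(b &&& a == b) := by
    rw [Bool.eq_iff_iff]
    simp only [Function.comp_def, pv_ite_eq_one, pv_ite_eq_zero, List.any_eq_true, List.mem_range,
      Bool.and_eq_true, Bool.not_eq_true', Bool.not_eq_true, beq_eq_false_iff_ne, ne_eq]
    constructor
    · rintro ⟨i, hin, hbi, hai⟩ h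
      rw [(pv_sub_iff b a).mp h i hbi] at hai
      simp at hai
    · intro h
      by_contra hno
      push_neg at hno
      apply h
      apply (pv_sub_iff b a).mpr
      intro i hi
      have hin : i < n := by
        by_contra hin
        rw [Nat.testBit_lt_two_pow (lt_of_lt_of_le hb (Nat.pow_le_pow_right (by omega) (by omega)))] at hi
        exact Bool.false_ne_true hi
      cases hai : a.testBit i
      · exact absurd hai (hno i hin hi)
      · rfl
  rw [key, Bool.not_not]

lemma pv_testA_eq (m : String) (n a : Nat) :
    ((PySem.List.pyRange 0 (n : Int) 1).all (fun label =>
        PySem.List.pyGetD m.toList label ' ' ≤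
          PySem.List.pyGetD (String.ofList ((PySem.List.pyRange 0 (n : Int) 1).map (pvBitChar (a : Int)))).toList label ' '))
      = (pvOk m.toList n && (pvReq m.toList n &&& a == pvReq m.toList n)) := by
  rw [pv_strA_eq, String.toList_ofList, pv_range_cast, List.all_map]
  rw [Bool.eq_iff_iff]
  simp only [Function.comp_def, PySem.List.pyGetD_natCast, List.all_eq_true, List.mem_range,
    Bool.and_eq_true, beq_iff_eq, pvOk, Bool.not_eq_true', List.any_eq_true, not_exists,
    decide_eq_true_eq, pv_sub_iff, pv_testBit_pvReq, Bool.not_eq_eq_eq_not]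
  constructor
  · intro h
    have hok : ∀ l, l < n → ¬ ('1' < m.toList.getD l ' ') := by
      intro l hl hc
      have := h l hl
      rw [pvStr, PySem.List.getD_map_range _ _ _ _ hl] at this
      by_cases hbit : a.testBit l
      · rw [if_pos hbit] at this; exact absurd (lt_of_lt_of_le hc this) (lt_irrefl _)
      · rw [if_neg hbit] at this
        exact absurd (lt_of_lt_of_le (lt_trans (by decide : ('0':Char) < '1') hc) this) (lt_irrefl _)
    refine ⟨by simpa using fun l hl => hok l hl, ?_⟩
    intro i hi
    simp only [Bool.and_eq_true, decide_eq_true_eq, Bool.not_eq_eq_eq_not, Bool.not_true,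
      decide_eq_false_iff_not] at hi
    obtain ⟨⟨hin, h0⟩, h1⟩ := hi
    have := h i hin
    rw [pvStr, PySem.List.getD_map_range _ _ _ _ hin] at this
    by_cases hbit : a.testBit i
    · exact hbit
    · rw [if_neg hbit] at this
      exact absurd (lt_of_lt_of_le h0 this) (lt_irrefl _)
  · rintro ⟨hok, hreq⟩ l hl
    rw [pvStr, PySem.List.getD_map_range _ _ _ _ hl]
    have hok' : ¬ ('1' < m.toList.getD l ' ') := by
      have h2 : ∀ x < n, ¬ ('1' < m.toList.getD x ' ') := by simpa using hok
      exact h2 l hl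
    by_cases hbit : a.testBit l
    · rw [if_pos hbit]; exact not_lt.mp hok'
    · rw [if_neg hbit]
      by_contra hc
      push_neg at hc
      have h0 : '0' < m.toList.getD l ' ' := hc
      have : a.testBit l = true := by
        apply hreq
        refine ⟨⟨hl, h0⟩, by simpa using hok'⟩
      exact hbit this

lemma pv_cov_eq (L : List String) (n a : Nat) :
    (L.any (fun m => pvOk m.toList n && (pvReq m.toList n &&& a == pvReq m.toList n)))
      = pvCov (pvRs L n) a := by
  rw [pvCov, pvRs, List.any_map, List.any_filter]
  rfl

lemma pv_existsMin (rs : List Nat) :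
    ∀ r, r ∈ rs → ∀ a, r &&& a = r → r ≠ a →
      ∃ b, pvCov rs b = true ∧ pvStrict rs b = false ∧ b &&& a = b ∧ b ≠ a := by
  intro r
  induction r using Nat.strong_induction_on with
  | _ r ih =>
    intro hr a hsub hne
    by_cases hstrict : pvStrict rs r = true
    · rw [pvStrict, List.any_eq_true] at hstrict
      obtain ⟨r', hr', hcond⟩ := hstrict
      simp only [Bool.and_eq_true, beq_iff_eq, bne_iff_ne, ne_eq] at hcond
      obtain ⟨hsub', hne'⟩ := hcond
      have hlt : r' < r := lt_of_le_of_ne (pv_sub_le hsub') hne'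
      have hlt2 : r < a := lt_of_le_of_ne (pv_sub_le hsub) hne
      exact ih r' hlt hr' a (pv_sub_trans hsub' hsub) (by omega)
    · refine ⟨r, ?_, by simpa using hstrict, hsub, hne⟩
      rw [pvCov, List.any_eq_true]
      exact ⟨r, hr, by simp [Nat.and_self]⟩

lemma pv_crux (rs : List Nat) (n k : Nat) (hk : k < 2 ^ n) :
    ((((List.range k).filter (fun b => pvCov rs b && !pvStrict rs b)).map
        (fun a => String.ofList (pvStr n a))).any (fun t => pvIncludes (String.ofList (pvStr n k)) t))
      = pvStrict rs k := by
  rw [List.any_map, Bool.eq_iff_iff]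
  simp only [Function.comp_def, List.any_eq_true, List.mem_filter, List.mem_range,
    Bool.and_eq_true, Bool.not_eq_true']
  constructor
  · rintro ⟨b, ⟨hbk, hcov, hnstrict⟩, hinc⟩
    rw [pv_includes_eq n k b (by omega)] at hinc
    have hsub : b &&& k = b := by simpa using hinc
    rw [pvCov, List.any_eq_true] at hcov
    obtain ⟨r, hr, hrsub⟩ := hcov
    have hrsub : r &&& b = r := by simpa using hrsub
    rw [pvStrict, List.any_eq_true]
    refine ⟨r, hr, ?_⟩
    have h1 : r &&& k = r := pv_sub_trans hrsub hsub
    have h2 : r ≤ b := pv_sub_le hrsub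
    simp only [Bool.and_eq_true, beq_iff_eq, bne_iff_ne, ne_eq]
    exact ⟨h1, by omega⟩
  · intro hstrict
    rw [pvStrict, List.any_eq_true] at hstrict
    obtain ⟨r, hr, hcond⟩ := hstrict
    simp only [Bool.and_eq_true, beq_iff_eq, bne_iff_ne, ne_eq] at hcond
    obtain ⟨hsub, hne⟩ := hcond
    obtain ⟨b, hcov, hnstrict, hbsub, hbne⟩ := pv_existsMin rs r hr k hsub hne
    have hblt : b < k := lt_of_le_of_ne (pv_sub_le hbsub) hbne
    refine ⟨b, ⟨hblt, hcov, hnstrict⟩, ?_⟩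
    rw [pv_includes_eq n k b (by omega)]
    simp [hbsub]

lemma pv_MF (rs : List Nat) (n : Nat) :
    ∀ k, k ≤ 2 ^ n →
      pvMintermsFirst (((List.range k).filter (pvCov rs)).map (fun a => String.ofList (pvStr n a))) =
        ( ((List.range k).filter (fun a => pvCov rs a && !pvStrict rs a)).map (fun a => String.ofList (pvStr n a)),
          ((List.range k).filter (fun a => pvCov rs a && pvStrict rs a)).map (fun a => String.ofList (pvStr n a)) ) := by
  intro k
  induction k with
  | zero => intro _; rfl
  | succ k ih =>
    intro hk
    have ihk := ih (by omega)
    rw [List.range_succ, List.filter_append, List.filter_append, List.filter_append,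
      List.map_append, List.map_append, List.map_append]
    rw [pvMintermsFirst, List.foldl_append, ← pvMintermsFirst]
    rw [ihk]
    by_cases hcov : pvCov rs k = true
    · rw [show (List.filter (pvCov rs) [k]) = [k] by simp [hcov]]
      by_cases hstrict : pvStrict rs k = true
      · rw [show List.filter (fun a => pvCov rs a && !pvStrict rs a) [k] = [] by simp [hcov, hstrict],
            show List.filter (fun a => pvCov rs a && pvStrict rs a) [k] = [k] by simp [hcov, hstrict]]
        simp only [List.map_cons, List.map_nil, List.foldl_cons, List.foldl_nil, List.append_nil]
        rw [if_pos]
        rw [pv_crux rs n k (by omega), hstrict]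
      · rw [show List.filter (fun a => pvCov rs a && pvStrict rs a) [k] = [] by simp [hcov, hstrict],
            show List.filter (fun a => pvCov rs a && !pvStrict rs a) [k] = [k] by simp [hcov, hstrict]]
        simp only [List.map_cons, List.map_nil, List.foldl_cons, List.foldl_nil, List.append_nil]
        rw [if_neg]
        rw [pv_crux rs n k (by omega)]
        simp [hstrict]
    · rw [show (List.filter (pvCov rs) [k]) = [] by simp [hcov],
          show List.filter (fun a => pvCov rs a && !pvStrict rs a) [k] = [] by simp [hcov],
          show List.filter (fun a => pvCov rs a && pvStrict rs a) [k] = [] by simp [hcov]]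
      simp [ihk]

lemma pv_A_eq (L : List String) : set_strings_from_minimal_sets L = pvCanon L := by
  simp only [set_strings_from_minimal_sets]
  rw [PySem.Str.len_eq, Int.toNat_natCast, Nat.one_shiftLeft]
  rw [pv_range_cast (2 ^ (L.headD "").toList.length), List.foldl_map]
  refine Eq.trans (congrArg pvMintermsFirst (PySem.List.foldl_congr_mem _ _
      (fun (acc : List String) (a : Nat) =>
        if pvCov (pvRs L (L.headD "").toList.length) a = true
        then acc ++ [String.ofList (pvStr (L.headD "").toList.length a)] else acc) [] ?_)) ?_
  · intro acc a _
    beta_reduce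
    simp only [pv_testA_eq]
    rw [pv_cov_eq, pv_strA_eq]
  · rw [PySem.List.foldl_append_if (fun a => pvCov (pvRs L (L.headD "").toList.length) a)
        (fun a => String.ofList (pvStr (L.headD "").toList.length a)), List.nil_append]
    rw [pv_MF (pvRs L (L.headD "").toList.length) (L.headD "").toList.length
        (2 ^ (L.headD "").toList.length) (le_refl _)]
    rw [pvCanon]

-- ===== B side =====

lemma pv_covB (rs : List Nat) (a : Nat) :
    ((rs.map (fun (r : Nat) => (r : Int))).any (fun r => PySem.Int.band r (a : Int) == r)) = pvCov rs a := by
  rw [pvCov, List.any_map, Bool.eq_iff_iff]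
  simp only [Function.comp_def, PySem.Int.band_natCast, List.any_eq_true, beq_iff_eq, Nat.cast_inj]

lemma pv_strictB (rs : List Nat) (a : Nat) :
    ((rs.map (fun (r : Nat) => (r : Int))).any (fun r => PySem.Int.band r (a : Int) == r && r != (a : Int))) = pvStrict rs a := by
  rw [pvStrict, List.any_map, Bool.eq_iff_iff]
  simp only [Function.comp_def, PySem.Int.band_natCast, List.any_eq_true, Bool.and_eq_true,
    beq_iff_eq, bne_iff_ne, ne_eq, Nat.cast_inj]

lemma pv_okStep (m : List Char) (n : Nat) :
    pvOk m (n + 1) = (pvOk m n && !decide ('1' < m.getD n ' ')) := by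
  rw [pvOk, pvOk, List.range_succ, List.any_append]
  simp

lemma pv_reqStep (m : List Char) (n : Nat) :
    pvReq m (n + 1) =
      (if '1' < m.getD n ' ' then pvReq m n
       else if '0' < m.getD n ' ' then pvReq m n ||| 2 ^ n
       else pvReq m n) := by
  rw [pvReq, pvReq, List.range_succ, List.foldl_append, List.foldl_cons, List.foldl_nil]

lemma pv_reqLabels_eq (s : String) (n : Nat) :
    pvRequiredLabels s (n : Int) =
      (if pvOk s.toList n = true then some ((pvReq s.toList n : Nat) : Int) else none) := by
  induction n with
  | zero =>
    rw [pvRequiredLabels, pv_range_cast]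
    simp [pvOk, pvReq]
  | succ n ih =>
    rw [pvRequiredLabels, pv_range_cast, List.foldl_map] at ih ⊢
    rw [List.range_succ, List.foldl_append, List.foldl_cons, List.foldl_nil, ih]
    by_cases hok : pvOk s.toList n = true
    · rw [if_pos hok, pv_okStep, pv_reqStep, hok, Bool.true_and]
      simp only [PySem.List.pyGetD_natCast, Int.toNat_natCast, List.getD_eq_getElem?_getD]
      by_cases h1 : '1' < s.toList[n]?.getD ' '
      · simp [h1, not_le.mpr h1]
      · by_cases h0 : '0' < s.toList[n]?.getD ' '
        · simp [h1, h0, Nat.one_shiftLeft]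
          rw [show ((2 : Int) ^ n) = (((2 ^ n : Nat)) : Int) by push_cast; ring]
          exact PySem.Int.bor_natCast _ _
        · simp [h1, h0, not_lt.mp h1]
    · rw [if_neg hok]
      have hok' : pvOk s.toList (n + 1) = false := by
        rw [pv_okStep, eq_false_of_ne_true hok, Bool.false_and]
      rw [hok', if_neg Bool.false_ne_true]

lemma pv_reqs_eq (L : List String) (n : Nat) :
    (L.map (fun s => pvRequiredLabels s (n : Int))).filterMap id
      = (pvRs L n).map (fun (r : Nat) => (r : Int)) := by
  induction L with
  | nil => rfl
  | cons s L ih =>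
    rw [List.map_cons, List.filterMap_cons, pv_reqLabels_eq]
    show _ = ((pvRs (s :: L) n).map (fun (r : Nat) => (r : Int)))
    rw [pvRs, List.filter_cons]
    by_cases hok : pvOk s.toList n = true
    · rw [if_pos hok, if_pos hok, List.map_cons, List.map_cons, ← pvRs, ← ih]
      rfl
    · rw [if_neg hok, if_neg hok, ← pvRs, ← ih]
      rfl

lemma pv_B_eq (L : List String) :
    set_strings_from_minimal_sets_alt L = pvCanon L := by
  simp only [set_strings_from_minimal_sets_alt]
  rw [PySem.Str.len_eq, Int.toNat_natCast, Nat.one_shiftLeft ((L.headD "").toList.length)]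
  rw [pv_reqs_eq L ((L.headD "").toList.length)]
  rw [pv_range_cast (2 ^ (L.headD "").toList.length), List.foldl_map]
  refine Eq.trans (PySem.List.foldl_congr_mem _ _
      (fun (acc : List String × List String) (a : Nat) =>
        if pvCov (pvRs L (L.headD "").toList.length) a = true then
          (if pvStrict (pvRs L (L.headD "").toList.length) a = true then
            (acc.1, acc.2 ++ [String.ofList (pvStr (L.headD "").toList.length a)])
          else (acc.1 ++ [String.ofList (pvStr (L.headD "").toList.length a)], acc.2))
        else acc) ([], []) ?_) ?_
  · intro acc a _
    beta_reduce
    rw [show (fun label => if PySem.Int.band ((a : Nat) : Int) (1 <<< label.toNat) ≠ 0 then '1' else '0')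
          = pvBitChar ((a : Nat) : Int) from rfl]
    rw [pv_covB, pv_strictB, pv_strA_eq]
  · refine Eq.trans (PySem.List.foldl_congr_mem _ _
        (fun (acc : List String × List String) (a : Nat) =>
          ((fun (x : List String) (a : Nat) =>
              if (pvCov (pvRs L (L.headD "").toList.length) a &&
                  !pvStrict (pvRs L (L.headD "").toList.length) a) = true
              then x ++ [String.ofList (pvStr (L.headD "").toList.length a)] else x) acc.1 a,
           (fun (y : List String) (a : Nat) =>
              if (pvCov (pvRs L (L.headD "").toList.length) a &&
                  pvStrict (pvRs L (L.headD "").toList.length) a) = true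
              then y ++ [String.ofList (pvStr (L.headD "").toList.length a)] else y) acc.2 a)) ([], []) ?_) ?_
    · intro acc a _
      beta_reduce
      by_cases hcov : pvCov (pvRs L (L.headD "").toList.length) a = true
      · by_cases hstrict : pvStrict (pvRs L (L.headD "").toList.length) a = true
        · rw [if_pos hcov, if_pos hstrict, if_neg (by rw [hcov, hstrict]; decide),
              if_pos (by rw [hcov, hstrict]; decide)]
        · have hs' := eq_false_of_ne_true hstrict
          rw [if_pos hcov, if_neg hstrict, if_pos (by rw [hcov, hs']; decide),
              if_neg (by rw [hcov, hs']; decide)]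
      · have hc' := eq_false_of_ne_true hcov
        rw [if_neg hcov, if_neg (by rw [hc']; simp), if_neg (by rw [hc']; simp)]
    · rw [PySem.List.foldl_prod_mk
          (f := fun (x : List String) (a : Nat) =>
            if (pvCov (pvRs L (L.headD "").toList.length) a &&
                !pvStrict (pvRs L (L.headD "").toList.length) a) = true
            then x ++ [String.ofList (pvStr (L.headD "").toList.length a)] else x)
          (g := fun (y : List String) (a : Nat) =>
            if (pvCov (pvRs L (L.headD "").toList.length) a &&
                pvStrict (pvRs L (L.headD "").toList.length) a) = true
            then y ++ [String.ofList (pvStr (L.headD "").toList.length a)] else y)]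
      rw [PySem.List.foldl_append_if
            (fun a => pvCov (pvRs L (L.headD "").toList.length) a &&
              !pvStrict (pvRs L (L.headD "").toList.length) a)
            (fun a => String.ofList (pvStr (L.headD "").toList.length a)),
          PySem.List.foldl_append_if
            (fun a => pvCov (pvRs L (L.headD "").toList.length) a &&
              pvStrict (pvRs L (L.headD "").toList.length) a)
            (fun a => String.ofList (pvStr (L.headD "").toList.length a)),
          List.nil_append, List.nil_append]
      rw [pvCanon]

-- ===== VERDICT (by name: the statement is the Claim_ definition above) =====
theorem set_strings_from_minimal_sets_spec : Claim_equal_set_strings_from_minimal_sets := by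
  intro L _ _
  unfold Spec_set_strings_from_minimal_sets
  rw [pv_A_eq, pv_B_eq]
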